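-- pv_equiv track=rewrite | github.com/vincenttzc/reddit_stonks | src/data_preprocess.py | process_ticker_list
-- ===== SOURCE A (Python) =====
-- def process_ticker_list(ticker_list, exception_list):
--     ticker_list_len_1 = [ticker for ticker in ticker_list if len(ticker) == 1]
--     full_exception_list = exception_list + ticker_list_len_1
--
--     dollar_ticker_list = ["$" + ticker for ticker in ticker_list]
--     ticker_list_no_exception = [
--         ticker for ticker in ticker_list if ticker not in full_exception_list
--     ]
--
--     full_ticker_list = dollar_ticker_list + ticker_list_no_exception
--     return full_ticker_list
-- ===== SOURCE B (Python) =====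
-- def process_ticker_list(ticker_list, exception_list):
--     dollar = []
--     no_exception = []
--     for ticker in ticker_list:
--         dollar.append("$" + ticker)
--         if len(ticker) != 1 and ticker not in exception_list:
--             no_exception.append(ticker)
--     return dollar + no_exception
-- ===== Notes on version B (the rewrite author's own statement) =====
-- stated objective: simpler
-- what changed: Fuses A's three list passes (length-1 collection, dollar list, exception-filtered list over a concatenated exception list) into one loop that appends to two accumulators, handling the length-1 exclusion inline with len(t) != 1.
import Mathlib
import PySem

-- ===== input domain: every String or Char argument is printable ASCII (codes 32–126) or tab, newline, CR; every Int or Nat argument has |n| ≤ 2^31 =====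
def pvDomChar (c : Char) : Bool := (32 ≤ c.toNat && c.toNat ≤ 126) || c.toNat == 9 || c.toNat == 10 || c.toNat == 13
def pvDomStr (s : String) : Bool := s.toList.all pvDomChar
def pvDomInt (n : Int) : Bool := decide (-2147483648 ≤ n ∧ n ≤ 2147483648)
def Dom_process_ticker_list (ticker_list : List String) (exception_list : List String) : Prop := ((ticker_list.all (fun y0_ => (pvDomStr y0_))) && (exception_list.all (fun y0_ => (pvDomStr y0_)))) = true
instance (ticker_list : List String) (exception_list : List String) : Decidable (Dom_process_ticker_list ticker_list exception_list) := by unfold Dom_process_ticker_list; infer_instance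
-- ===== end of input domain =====

-- B fuses A's three passes into one loop with two accumulators (objective: simpler).

-- ===== PORT A =====
def process_ticker_list (ticker_list : List String) (exception_list : List String) : List String :=
  let ticker_list_len_1 := ticker_list.filter (fun t => PySem.Str.len t == 1)
  let full_exception_list := exception_list ++ ticker_list_len_1
  let dollar_ticker_list := ticker_list.map (fun t => "$" ++ t)
  let ticker_list_no_exception :=
    ticker_list.filter (fun t => !(full_exception_list.contains t))
  dollar_ticker_list ++ ticker_list_no_exception

-- ===== PORT B =====
def process_ticker_list_alt (ticker_list : List String) (exception_list : List String) : List String :=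
  let p :=
    ticker_list.foldl
      (fun (acc : List String × List String) t =>
        (acc.1 ++ ["$" ++ t],
         if !(PySem.Str.len t == 1) && !(exception_list.contains t) then acc.2 ++ [t] else acc.2))
      ([], [])
  p.1 ++ p.2

-- ===== PRECONDITION & SPEC =====
def Spec_process_ticker_list (ticker_list : List String) (exception_list : List String) (out : List String) : Prop := out = process_ticker_list_alt ticker_list exception_list
instance (ticker_list : List String) (exception_list : List String) (out : List String) : Decidable (Spec_process_ticker_list ticker_list exception_list out) := by unfold Spec_process_ticker_list; infer_instance

-- ===== CLAIM (what is proved, stated in full; the proofs are below) =====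
def Claim_equal_process_ticker_list : Prop := ∀ (ticker_list : List String) (exception_list : List String), Dom_process_ticker_list ticker_list exception_list → Spec_process_ticker_list ticker_list exception_list (process_ticker_list ticker_list exception_list)

-- ===== LEMMAS AND PROOFS =====

-- The fused fold produces (dollar map, filter) in one pass.
theorem alt_foldl_eq (el : List String) (tl : List String) (d n : List String) :
    tl.foldl
      (fun (acc : List String × List String) t =>
        (acc.1 ++ ["$" ++ t],
         if !(PySem.Str.len t == 1) && !(el.contains t) then acc.2 ++ [t] else acc.2))
      (d, n)
    = (d ++ tl.map (fun t => "$" ++ t),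
       n ++ tl.filter (fun t => !(PySem.Str.len t == 1) && !(el.contains t))) := by
  induction tl generalizing d n with
  | nil => simp
  | cons t ts ih =>
    simp only [List.foldl_cons, List.map_cons, List.filter_cons]
    rw [ih]
    split_ifs <;> simp

-- For t drawn from tl, membership in A's concatenated exception list
-- matches B's inline test.
theorem filter_cond_eq (el : List String) (tl : List String) :
    tl.filter (fun t => !((el ++ tl.filter (fun t => PySem.Str.len t == 1)).contains t))
    = tl.filter (fun t => !(PySem.Str.len t == 1) && !(el.contains t)) := by
  apply List.filter_congr
  intro x hx
  by_cases h : (PySem.Str.len x == 1) = true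
  · have hl : x.length = 1 := by
      have := eq_of_beq h
      simp only [PySem.Str.len] at this
      exact_mod_cast this
    simp [hx, hl]
  · have hl : x.length ≠ 1 := fun e => h (by simp [PySem.Str.len, e])
    simp [hx, hl, PySem.Str.len]

theorem process_ticker_list_eq (tl el : List String) :
    process_ticker_list tl el = process_ticker_list_alt tl el := by
  unfold process_ticker_list process_ticker_list_alt
  rw [alt_foldl_eq]
  simp only [List.nil_append]
  rw [filter_cond_eq]

-- ===== VERDICT (by name: the statement is the Claim_ definition above) =====
theorem process_ticker_list_spec : Claim_equal_process_ticker_list := by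
  intro tl el _
  unfold Spec_process_ticker_list
  exact process_ticker_list_eq tl el
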